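-- pv_equiv track=rewrite | github.com/hys20151008/datastructures | daa/1.1.12.py | openorclosed
-- ===== SOURCE A (Python) =====
-- def openorclosed(n):
--     init = [False]*n
--     count = 1
--     while count <= n:
--         for i in range(n):
--             if (i+1) % count == 0:
--                 init[i] = not init[i]
--         count += 1
--     return init
-- ===== SOURCE B (Python) =====
-- def openorclosed(n):
--     # Door i ends open iff i+1 has an odd number of divisors, i.e. i+1 is a
--     # perfect square: mark exactly the square positions in one pass, O(n).
--     res = [False] * n
--     k = 1
--     while k * k <= n:
--         res[k * k - 1] = True
--         k += 1
--     return res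
-- ===== Notes on version B (the rewrite author's own statement) =====
-- stated objective: faster
-- what changed: Replaced the n passes of divisor-toggling over the whole list by directly marking the perfect-square positions (door i+1 ends open iff i+1 is a perfect square), one sqrt(n)-step marking loop over a list built once.
import Mathlib
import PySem

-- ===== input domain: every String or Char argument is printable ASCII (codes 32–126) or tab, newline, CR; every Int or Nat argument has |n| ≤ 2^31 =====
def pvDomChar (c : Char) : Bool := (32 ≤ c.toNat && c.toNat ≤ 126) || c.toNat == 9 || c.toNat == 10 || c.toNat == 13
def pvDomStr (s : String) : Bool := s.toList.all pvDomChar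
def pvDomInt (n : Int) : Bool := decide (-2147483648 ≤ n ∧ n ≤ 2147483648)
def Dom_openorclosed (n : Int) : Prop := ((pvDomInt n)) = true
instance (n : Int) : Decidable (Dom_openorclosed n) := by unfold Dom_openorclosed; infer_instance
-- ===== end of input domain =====

-- B replaces A's n full divisor-toggling passes by a single loop marking the
-- perfect-square positions; same return value on every input.

-- ===== PORT A =====
-- init = [False]*n; while count <= n: for i in range(n): if (i+1) % count == 0: init[i] = not init[i]
def openorclosed (n : Int) : List Bool :=
  (PySem.List.pyRange 1 (n + 1) 1).foldl
    (fun init count =>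
      init.mapIdx (fun i b => if PySem.Int.mod ((i : Int) + 1) count == 0 then !b else b))
    (List.replicate n.toNat false)

-- ===== PORT B =====
-- res = [False]*n; k = 1; while k*k <= n: res[k*k-1] = True; k += 1
def openorclosed_altGo (n : Int) (res : List Bool) (k : Nat) : List Bool :=
  if h : (k : Int) * k ≤ n then
    openorclosed_altGo n (res.set (k * k - 1) true) (k + 1)
  else res
termination_by n.toNat + 1 - k * k
decreasing_by
  have hk : k * k ≤ n.toNat := by
    have : ((k * k : Nat) : Int) ≤ n := by push_cast; exact h
    omega
  have : (k + 1) * (k + 1) = k * k + 2 * k + 1 := by ring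
  omega

def openorclosed_alt (n : Int) : List Bool :=
  openorclosed_altGo n (List.replicate n.toNat false) 1

-- ===== PRECONDITION & SPEC =====
def Spec_openorclosed (n : Int) (out : List Bool) : Prop := out = openorclosed_alt n
instance (n : Int) (out : List Bool) : Decidable (Spec_openorclosed n out) := by unfold Spec_openorclosed; infer_instance

-- ===== CLAIM (what is proved, stated in full; the proofs are below) =====
def Claim_equal_openorclosed : Prop := ∀ (n : Int), Dom_openorclosed n → Spec_openorclosed n (openorclosed n)

-- ===== LEMMAS AND PROOFS =====
-- ===== A side =====
lemma foldA_length (cs : List Int) (l : List Bool) :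
    (cs.foldl (fun init count =>
      init.mapIdx (fun i b => if PySem.Int.mod ((i : Int) + 1) count == 0 then !b else b)) l).length
      = l.length := by
  induction cs generalizing l with
  | nil => rfl
  | cons c cs ih => rw [List.foldl_cons, ih, List.length_mapIdx]

lemma foldA_getElem (cs : List Int) (l : List Bool) (i : Nat) (h : i < l.length) :
    (cs.foldl (fun init count =>
      init.mapIdx (fun i b => if PySem.Int.mod ((i : Int) + 1) count == 0 then !b else b)) l)[i]'(by
        rw [foldA_length]; exact h)
      = xor l[i] (decide (Odd (cs.countP (fun c => PySem.Int.mod ((i : Int) + 1) c == 0)))) := by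
  induction cs generalizing l with
  | nil => simp
  | cons c cs ih =>
    simp only [List.foldl_cons, List.countP_cons]
    have h' : i < (l.mapIdx (fun i b => if PySem.Int.mod ((i : Int) + 1) c == 0 then !b else b)).length := by
      simpa [List.length_mapIdx] using h
    rw [ih _ h']
    rw [List.getElem_mapIdx]
    by_cases hp : PySem.Int.mod ((i : Int) + 1) c == 0
    · rcases Nat.even_or_odd (cs.countP (fun c => PySem.Int.mod ((i : Int) + 1) c == 0)) with he | ho
      · simp [hp, Nat.not_odd_iff_even.mpr he, he]
      · simp [hp, Nat.odd_add_one, ho]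
    · simp [hp]

lemma countP_range_divisors (m N : Nat) (h1 : 1 ≤ m) (h2 : m ≤ N) :
    (List.range N).countP (fun k => decide ((k + 1) ∣ m)) = m.divisors.card := by
  have key : ∀ M : Nat, (List.range M).countP (fun k => decide ((k + 1) ∣ m))
      = (m.divisors.filter (· ≤ M)).card := by
    intro M
    induction M with
    | zero =>
      have hempty : m.divisors.filter (· ≤ 0) = ∅ := by
        ext d
        simp only [Finset.mem_filter, Nat.mem_divisors, Finset.notMem_empty, iff_false]
        rintro ⟨⟨hd, hm0⟩, hd0⟩
        have := Nat.pos_of_dvd_of_pos hd (by omega)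
        omega
      rw [List.range_zero, List.countP_nil, hempty, Finset.card_empty]
    | succ M ih =>
      rw [List.range_succ, List.countP_append, ih]
      have hsplit : m.divisors.filter (· ≤ M + 1)
          = if (M + 1) ∣ m then insert (M + 1) (m.divisors.filter (· ≤ M))
            else m.divisors.filter (· ≤ M) := by
        by_cases hd : (M + 1) ∣ m
        · ext d
          simp only [Finset.mem_filter, Nat.mem_divisors, hd, if_true, Finset.mem_insert]
          constructor
          · rintro ⟨⟨hdm, hm0⟩, hle⟩
            rcases Nat.lt_or_ge d (M + 1) with hlt | hge
            · exact Or.inr ⟨⟨hdm, hm0⟩, by omega⟩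
            · exact Or.inl (by omega)
          · rintro (rfl | ⟨⟨hdm, hm0⟩, hle⟩)
            · exact ⟨⟨hd, by omega⟩, le_rfl⟩
            · exact ⟨⟨hdm, hm0⟩, by omega⟩
        · ext d
          simp only [Finset.mem_filter, Nat.mem_divisors, hd, if_false]
          constructor
          · rintro ⟨⟨hdm, hm0⟩, hle⟩
            have hne : d ≠ M + 1 := by rintro rfl; exact hd hdm
            exact ⟨⟨hdm, hm0⟩, by omega⟩
          · rintro ⟨⟨hdm, hm0⟩, hle⟩
            exact ⟨⟨hdm, hm0⟩, by omega⟩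
      rw [hsplit]
      by_cases hd : (M + 1) ∣ m
      · have hnotmem : (M + 1) ∉ m.divisors.filter (· ≤ M) := by
          simp only [Finset.mem_filter]
          rintro ⟨-, hle⟩; omega
        simp [hd, Finset.card_insert_of_notMem hnotmem]
      · simp [hd]
  rw [key N]
  congr 1
  apply Finset.filter_true_of_mem
  intro d hd
  have := Nat.divisor_le hd
  omega

lemma odd_card_divisors_iff (m : Nat) (hm : m ≠ 0) :
    Odd m.divisors.card ↔ IsSquare m := by
  rw [Nat.card_divisors hm]
  have h1 : Odd (∏ p ∈ m.primeFactors, (m.factorization p + 1))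
      ↔ ∀ p ∈ m.primeFactors, Even (m.factorization p) := by
    rw [← Nat.not_even_iff_odd, even_iff_two_dvd,
      (Nat.Prime.prime Nat.prime_two).dvd_finset_prod_iff _]
    constructor
    · intro h p hp
      by_contra hodd
      rw [Nat.not_even_iff_odd, Nat.odd_iff] at hodd
      exact h ⟨p, hp, by omega⟩
    · rintro h ⟨p, hp, hdvd⟩
      have := h p hp
      rw [Nat.even_iff] at this
      omega
  rw [h1]
  constructor
  · intro h
    refine ⟨m.factorization.prod fun p k => p ^ (k / 2), ?_⟩
    conv_lhs => rw [← Nat.prod_factorization_pow_eq_self hm]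
    rw [Finsupp.prod, Finsupp.prod, ← Finset.prod_mul_distrib]
    apply Finset.prod_congr rfl
    intro p hp
    rw [← pow_add]
    congr 1
    rw [Nat.support_factorization] at hp
    obtain ⟨t, ht⟩ := h p hp
    omega
  · rintro ⟨r, rfl⟩ p hp
    have hr : r ≠ 0 := by rintro rfl; simp at hm
    rw [Nat.factorization_mul hr hr]
    simp only [Finsupp.add_apply]
    exact ⟨r.factorization p, by ring⟩

-- ===== B side =====
lemma altGo_length (n : Int) (res : List Bool) (k : Nat) :
    (openorclosed_altGo n res k).length = res.length := by
  induction res, k using openorclosed_altGo.induct n with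
  | case1 res k h ih => rw [openorclosed_altGo]; simp [h, ih]
  | case2 res k h => rw [openorclosed_altGo]; simp [h]

lemma altGo_getElem (n : Int) (res : List Bool) (k : Nat) (i : Nat)
    (hk : 1 ≤ k) (hi : i < res.length) :
    ((openorclosed_altGo n res k)[i]'(by rw [altGo_length]; exact hi) = true)
      ↔ (res[i] = true ∨ ∃ j : Nat, k ≤ j ∧ j * j = i + 1 ∧ ((j : Int) * j ≤ n)) := by
  induction res, k using openorclosed_altGo.induct n with
  | case1 res k h ih =>
    have hi' : i < (res.set (k * k - 1) true).length := by simpa using hi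
    have hstep : openorclosed_altGo n res k
        = openorclosed_altGo n (res.set (k * k - 1) true) (k + 1) := by
      rw [openorclosed_altGo]; simp [h]
    simp only [hstep]
    rw [ih (by omega) hi']
    rw [List.getElem_set]
    constructor
    · rintro (hres | ⟨j, hj1, hj2, hj3⟩)
      · split at hres
        · next heq =>
          have hkk : 1 ≤ k * k := Nat.mul_le_mul hk hk
          exact Or.inr ⟨k, le_rfl, by omega, h⟩
        · exact Or.inl hres
      · exact Or.inr ⟨j, by omega, hj2, hj3⟩
    · rintro (hres | ⟨j, hj1, hj2, hj3⟩)
      · left; split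
        · rfl
        · exact hres
      · rcases Nat.eq_or_lt_of_le hj1 with rfl | hlt
        · left
          have hkk : 1 ≤ k * k := Nat.mul_le_mul hk hk
          have heq : k * k - 1 = i := by omega
          simp [heq]
        · exact Or.inr ⟨j, by omega, hj2, hj3⟩
  | case2 res k h =>
    have hstop : openorclosed_altGo n res k = res := by
      rw [openorclosed_altGo]; simp [h]
    simp only [hstop]
    constructor
    · exact Or.inl
    · rintro (hres | ⟨j, hj1, hj2, hj3⟩)
      · exact hres
      · exfalso
        apply h
        calc (k : Int) * k ≤ (j : Int) * j := by
              have : (k : Int) ≤ j := by exact_mod_cast hj1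
              have hk0 : (0 : Int) ≤ k := Int.natCast_nonneg k
              nlinarith
          _ ≤ n := hj3

lemma openorclosed_eq_alt (n : Int) : openorclosed n = openorclosed_alt n := by
  unfold openorclosed openorclosed_alt
  apply List.ext_getElem
  · rw [foldA_length, altGo_length]
  · intro i h1 h2
    have hi : i < n.toNat := by
      have h2' := h2
      rw [altGo_length, List.length_replicate] at h2'
      exact h2'
    have hirep : i < (List.replicate n.toNat false).length := by simpa using hi
    rw [foldA_getElem _ _ _ hirep, Bool.eq_iff_iff,
      altGo_getElem n _ 1 i le_rfl hirep]
    simp only [List.getElem_replicate, Bool.false_xor, decide_eq_true_eq, Bool.false_eq_true,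
      false_or]
    -- count = number of divisors of i+1
    have hcnt : (PySem.List.pyRange 1 (n + 1) 1).countP
        (fun c => PySem.Int.mod ((i : Int) + 1) c == 0) = (i + 1).divisors.card := by
      rw [PySem.List.pyRange_one]
      have hn1 : (n + 1 - 1 : Int) = n := by ring
      rw [hn1, List.countP_map]
      have hcong : ∀ k ∈ List.range n.toNat,
          (((fun c => PySem.Int.mod ((i : Int) + 1) c == 0) ∘ (fun k : Nat => (1 : Int) + k)) k = true
            ↔ (fun k => decide ((k + 1) ∣ (i + 1))) k = true) := by
        intro k _
        simp only [Function.comp_apply, beq_iff_eq, decide_eq_true_eq]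
        rw [PySem.Int.mod_eq_zero_iff_dvd]
        have hcomm : (1 + (k : Int)) = ((k + 1 : Nat) : Int) := by push_cast; ring
        have hi1 : ((i : Int) + 1) = ((i + 1 : Nat) : Int) := by push_cast; ring
        rw [hcomm, hi1, Int.natCast_dvd_natCast]
      rw [List.countP_congr hcong]
      exact countP_range_divisors (i + 1) n.toNat (by omega) (by omega)
    rw [hcnt, odd_card_divisors_iff (i + 1) (by omega)]
    constructor
    · rintro ⟨r, hr⟩
      have hr1 : 1 ≤ r := by
        rcases Nat.eq_zero_or_pos r with rfl | h; · omega
        · omega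
      refine ⟨r, hr1, hr.symm, ?_⟩
      have hle : ((r * r : Nat) : Int) ≤ n := by omega
      push_cast at hle
      exact hle
    · rintro ⟨j, hj1, hj2, hj3⟩
      exact ⟨j, hj2.symm⟩

-- ===== VERDICT (by name: the statement is the Claim_ definition above) =====
theorem openorclosed_spec : Claim_equal_openorclosed := by
  intro n _
  unfold Spec_openorclosed
  exact openorclosed_eq_alt n
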